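-- pv_equiv track=rewrite | github.com/Seohyeong/AoC | day_14/day_14.py | does_straight_line_exist
-- ===== SOURCE A (Python) =====
-- def does_straight_line_exist(grid: list[list[int]], target_len: int) -> bool:
--     for row in grid:
--         line_len = 0
--         for item in row:
--             if item != 0:
--                 line_len += 1
--                 if line_len >= target_len:
--                     return True
--             else:
--                 line_len = 0
--     return False
-- ===== SOURCE B (Python) =====
-- def _nonzero_run_lengths(row):
--     """Lengths of the maximal runs of nonzero cells in the row."""
--     lengths = []
--     n = 0
--     for v in row:
--         if v != 0:
--             n += 1
--         else:
--             if n: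
--                 lengths.append(n)
--             n = 0
--     if n:
--         lengths.append(n)
--     return lengths
--
--
-- def does_straight_line_exist(grid, target_len):
--     return any(
--         any(length >= target_len for length in _nonzero_run_lengths(row))
--         for row in grid
--     )
-- ===== Notes on version B (the rewrite author's own statement) =====
-- stated objective: alternative
-- what changed: A streams each row with a running counter and an inline threshold test with early return; B first decomposes each row into the list of maximal nonzero-run lengths and then tests whether any run length reaches the target.
import Mathlib
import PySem

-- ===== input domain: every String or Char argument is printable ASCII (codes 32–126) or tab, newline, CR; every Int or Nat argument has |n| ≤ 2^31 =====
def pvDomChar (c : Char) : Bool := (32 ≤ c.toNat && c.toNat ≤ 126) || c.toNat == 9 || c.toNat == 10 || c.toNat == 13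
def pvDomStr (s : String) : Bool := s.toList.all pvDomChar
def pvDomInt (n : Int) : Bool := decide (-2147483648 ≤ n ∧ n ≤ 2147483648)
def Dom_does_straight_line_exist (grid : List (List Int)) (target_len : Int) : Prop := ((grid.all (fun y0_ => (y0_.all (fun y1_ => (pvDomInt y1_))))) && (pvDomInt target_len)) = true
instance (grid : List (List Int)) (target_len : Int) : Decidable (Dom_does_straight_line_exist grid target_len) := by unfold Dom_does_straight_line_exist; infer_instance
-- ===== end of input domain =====

-- B replaces A's streaming counter + inline threshold test by a decomposition of each
-- row into its maximal nonzero-run lengths, then an any-test; alternative, same cost.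


-- ===== PORT A =====
-- inner 'for item in row' loop of A: running counter line_len, early return True
def pvRowA (row : List Int) (target_len : Int) (line_len : Int) : Bool :=
  match row with
  | [] => false
  | item :: rest =>
    if item ≠ 0 then
      if line_len + 1 ≥ target_len then true
      else pvRowA rest target_len (line_len + 1)
    else pvRowA rest target_len 0

def does_straight_line_exist (grid : List (List Int)) (target_len : Int) : Bool :=
  match grid with
  | [] => false
  | row :: rest =>
    if pvRowA row target_len 0 then true
    else does_straight_line_exist rest target_len

-- ===== PORT B =====
-- _nonzero_run_lengths: lengths of the maximal runs of nonzero cells (n = current run)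
def pvRuns (row : List Int) (n : Nat) : List Nat :=
  match row with
  | [] => if n = 0 then [] else [n]
  | v :: rest =>
    if v ≠ 0 then pvRuns rest (n + 1)
    else if n = 0 then pvRuns rest 0 else n :: pvRuns rest 0

def does_straight_line_exist_alt (grid : List (List Int)) (target_len : Int) : Bool :=
  grid.any (fun row => (pvRuns row 0).any (fun length => (length : Int) ≥ target_len))

-- ===== PRECONDITION & SPEC =====
def Spec_does_straight_line_exist (grid : List (List Int)) (target_len : Int) (out : Bool) : Prop := out = does_straight_line_exist_alt grid target_len
instance (grid : List (List Int)) (target_len : Int) (out : Bool) : Decidable (Spec_does_straight_line_exist grid target_len out) := by unfold Spec_does_straight_line_exist; infer_instance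

-- ===== CLAIM (what is proved, stated in full; the proofs are below) =====
def Claim_equal_does_straight_line_exist : Prop := ∀ (grid : List (List Int)) (target_len : Int), Dom_does_straight_line_exist grid target_len → Spec_does_straight_line_exist grid target_len (does_straight_line_exist grid target_len)

-- ===== LEMMAS AND PROOFS =====

-- every run list produced from a started run (0 < n) contains a run of length ≥ n
theorem pvRuns_mono (row : List Int) (n : Nat) (hn : 0 < n) :
    ∃ l ∈ pvRuns row n, n ≤ l := by
  induction row generalizing n with
  | nil => exact ⟨n, by simp [pvRuns, Nat.pos_iff_ne_zero.mp hn], le_refl n⟩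
  | cons v rest ih =>
    by_cases hv : v ≠ 0
    · obtain ⟨l, hl, hle⟩ := ih (n + 1) (Nat.succ_pos n)
      exact ⟨l, by simp [pvRuns, hv, hl], Nat.le_of_succ_le hle⟩
    · refine ⟨n, ?_, le_refl n⟩
      simp [pvRuns, hv, Nat.pos_iff_ne_zero.mp hn]

-- A's inner loop equals B's run-length test, given the invariant that the current
-- run length k has not yet reached the target (else A would have returned already)
theorem pvRow_eq (t : Int) (row : List Int) (k : Nat) (hk : k = 0 ∨ (k : Int) < t) :
    pvRowA row t (k : Int) = (pvRuns row k).any (fun l => (l : Int) ≥ t) := by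
  induction row generalizing k with
  | nil =>
    rcases hk with h0 | hlt
    · simp [pvRowA, pvRuns, h0]
    · by_cases h0 : k = 0
      · simp [pvRowA, pvRuns, h0]
      · simp [pvRowA, pvRuns, h0]
        omega
  | cons v rest ih =>
    by_cases hv : v ≠ 0
    · by_cases hfire : (k : Int) + 1 ≥ t
      · obtain ⟨l, hl, hle⟩ := pvRuns_mono rest (k + 1) (Nat.succ_pos k)
        have : (pvRuns rest (k + 1)).any (fun l => (l : Int) ≥ t) = true := by
          refine List.any_eq_true.mpr ⟨l, hl, ?_⟩
          simp; omega
        simp [pvRowA, pvRuns, hv, hfire, this]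
      · have := ih (k + 1) (Or.inr (by omega))
        simpa [pvRowA, pvRuns, hv, hfire, Int.add_comm] using this
    · have := ih 0 (Or.inl rfl)
      by_cases h0 : k = 0
      · simpa [pvRowA, pvRuns, hv, h0] using this
      · have hkt : ¬ ((k : Int) ≥ t) := by omega
        simp [pvRowA, pvRuns, hv, h0, hkt]
        simpa [pvRowA] using this

-- ===== VERDICT (by name: the statement is the Claim_ definition above) =====
theorem pv_main (grid : List (List Int)) (t : Int) :
    does_straight_line_exist grid t = does_straight_line_exist_alt grid t := by
  induction grid with
  | nil => simp [does_straight_line_exist, does_straight_line_exist_alt]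
  | cons row rest ih =>
    have hrow := pvRow_eq t row 0 (Or.inl rfl)
    by_cases h : pvRowA row t 0 = true
    · simp [does_straight_line_exist, does_straight_line_exist_alt, h, ← hrow]
    · simp only [does_straight_line_exist, does_straight_line_exist_alt] at *
      simp [h, ← hrow, ih]

theorem does_straight_line_exist_spec : Claim_equal_does_straight_line_exist :=
  fun grid t _ => pv_main grid t
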